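-- pv_equiv track=rewrite | github.com/SudoSurya/CS-Fundamentals | Exercises/sorting/handson.py | solve
-- ===== SOURCE A (Python) =====
-- from itertools import permutations
--
-- def solve(N,A):
--     count = int(0)
--     dic = {k: v for k, v in enumerate(A)}
--     perms = list(permutations(dic.keys(), 4))
--     tempmap = {}
--     for i in perms:
--         temp = list(i)
--         if str(temp) not in tempmap:
--             tempmap[str(temp)] = 1
--             if A[temp[0]] > A[temp[1]] and A[temp[2]] < A[temp[3]] and temp[0] < temp[1] < temp[2] < temp[3]:
--                 count += 1
--     return count % (10**9 + 7)
-- ===== SOURCE B (Python) =====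
-- def solve(N, A):
--     # Single backward pass over split points: for each j (right element of the
--     # inversion pair) multiply the number of inversions (i, j) with i < j by the
--     # number of ascents (k, l) with j < k < l, maintained as a suffix sum.  O(n^2).
--     n = len(A)
--     total = 0
--     asc_suffix = 0  # sum over k > j of #{l > k : A[k] < A[l]}
--     for j in range(n - 1, -1, -1):
--         inv_j = sum(1 for i in range(j) if A[i] > A[j])
--         asc_j = sum(1 for l in range(j + 1, n) if A[j] < A[l])
--         total += inv_j * asc_suffix
--         asc_suffix += asc_j
--     return total % (10**9 + 7)
-- ===== Notes on version B (the rewrite author's own statement) =====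
-- stated objective: faster
-- what changed: A enumerates all 4-element permutations of the indices (dict-deduplicated) and tests each tuple; B makes one backward pass over split points j, multiplying the count of inversions (i,j) with i<j by a maintained suffix sum of ascent counts (k,l) with j<k<l.
import Mathlib
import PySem

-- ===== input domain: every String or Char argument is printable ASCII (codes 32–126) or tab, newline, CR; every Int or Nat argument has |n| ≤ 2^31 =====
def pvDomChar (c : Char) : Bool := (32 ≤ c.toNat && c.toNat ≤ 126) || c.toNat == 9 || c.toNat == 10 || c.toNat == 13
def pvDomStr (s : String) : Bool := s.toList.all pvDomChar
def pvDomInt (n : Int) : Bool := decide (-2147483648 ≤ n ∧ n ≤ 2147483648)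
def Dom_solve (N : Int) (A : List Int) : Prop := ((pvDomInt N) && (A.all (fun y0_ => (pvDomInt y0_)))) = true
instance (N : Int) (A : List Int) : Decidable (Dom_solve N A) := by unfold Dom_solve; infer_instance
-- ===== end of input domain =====

-- B replaces A's brute-force scan of all 4-element permutations by one backward
-- pass over split points summing left-inversion counts times a suffix sum of
-- ascent counts (objective: faster).

-- ===== PORT A =====
-- A indexes A only with indices drawn from range(len(A)), so every A[...] is in
-- range: ported with pyGetD.  The dict key 'str(temp)' is ported as the list
-- 'temp' itself: str is injective on lists of ints, so membership tests agree.
def solve (N : Int) (A : List Int) : Int :=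
  let count : Int := 0
  let dic : PySem.Dict Int Int := PySem.Dict.ofList (PySem.List.enumerate A)
  let perms : List (List Int) := PySem.List.permutations dic.keys 4
  let r := perms.foldl (fun (st : Int × PySem.Dict (List Int) Int) i =>
    let temp := i
    if st.2.contains temp = false then
      let st2 := st.2.insert temp 1
      if PySem.List.pyGetD A (PySem.List.pyGetD temp 0 0) 0 > PySem.List.pyGetD A (PySem.List.pyGetD temp 1 0) 0
         ∧ PySem.List.pyGetD A (PySem.List.pyGetD temp 2 0) 0 < PySem.List.pyGetD A (PySem.List.pyGetD temp 3 0) 0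
         ∧ PySem.List.pyGetD temp 0 0 < PySem.List.pyGetD temp 1 0
         ∧ PySem.List.pyGetD temp 1 0 < PySem.List.pyGetD temp 2 0
         ∧ PySem.List.pyGetD temp 2 0 < PySem.List.pyGetD temp 3 0
      then (st.1 + 1, st2) else (st.1, st2)
    else st) (count, PySem.Dict.empty)
  PySem.Int.mod r.1 (10 ^ 9 + 7)

-- ===== PORT B =====
def solve_alt (N : Int) (A : List Int) : Int :=
  let n : Int := A.length
  let r := (PySem.List.pyRange (n - 1) (-1) (-1)).foldl (fun (st : Int × Int) j =>
      let invj : Int := ((PySem.List.pyRange 0 j 1).map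
        (fun i => if PySem.List.pyGetD A i 0 > PySem.List.pyGetD A j 0 then (1 : Int) else 0)).sum
      let ascj : Int := ((PySem.List.pyRange (j + 1) n 1).map
        (fun l => if PySem.List.pyGetD A j 0 < PySem.List.pyGetD A l 0 then (1 : Int) else 0)).sum
      (st.1 + invj * st.2, st.2 + ascj)) (0, 0)
  PySem.Int.mod r.1 (10 ^ 9 + 7)

-- ===== PRECONDITION & SPEC =====
def Spec_solve (N : Int) (A : List Int) (out : Int) : Prop := out = solve_alt N A
instance (N : Int) (A : List Int) (out : Int) : Decidable (Spec_solve N A out) := by unfold Spec_solve; infer_instance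

-- ===== CLAIM (what is proved, stated in full; the proofs are below) =====
def Claim_equal_solve : Prop := ∀ (N : Int) (A : List Int), Dom_solve N A → Spec_solve N A (solve N A)

-- ===== LEMMAS AND PROOFS =====

-- Indicator, inversion/ascent counts and the common middle form of both programs.
def pvInd (p : Prop) [Decidable p] : Int := if p then 1 else 0

def pvInv (A : List Int) (b : Nat) : Int :=
  ∑ a ∈ Finset.range b, pvInd (A.getD a 0 > A.getD b 0)

def pvAsc (A : List Int) (c : Nat) : Int :=
  ∑ l ∈ Finset.Ico (c + 1) A.length, pvInd (A.getD c 0 < A.getD l 0)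

def pvT (A : List Int) (b : Nat) : Int :=
  ∑ c ∈ Finset.Ico (b + 1) A.length, pvAsc A c

def pvM (A : List Int) : Int := ∑ b ∈ Finset.range A.length, pvInv A b * pvT A b

-- the Bool form of A's inner condition
def pvPb (A : List Int) (t : List Int) : Bool :=
  decide (PySem.List.pyGetD A (PySem.List.pyGetD t 0 0) 0 > PySem.List.pyGetD A (PySem.List.pyGetD t 1 0) 0
     ∧ PySem.List.pyGetD A (PySem.List.pyGetD t 2 0) 0 < PySem.List.pyGetD A (PySem.List.pyGetD t 3 0) 0
     ∧ PySem.List.pyGetD t 0 0 < PySem.List.pyGetD t 1 0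
     ∧ PySem.List.pyGetD t 1 0 < PySem.List.pyGetD t 2 0
     ∧ PySem.List.pyGetD t 2 0 < PySem.List.pyGetD t 3 0)

-- the canonical list of increasing index quadruples
def pvQ4 (n : Int) : List (List Int) :=
  (PySem.List.pyRange 0 n 1).flatMap (fun a =>
    (PySem.List.pyRange (a + 1) n 1).flatMap (fun b =>
      (PySem.List.pyRange (b + 1) n 1).flatMap (fun c =>
        (PySem.List.pyRange (c + 1) n 1).map (fun d => [a, b, c, d]))))

-- ---- small generic helpers ----
lemma pvSum_flatMap {α β : Type} (l : List α) (f : α → List β) (g : β → Int) :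
    ((l.flatMap f).map g).sum = (l.map (fun x => ((f x).map g).sum)).sum := by
  induction l with
  | nil => rfl
  | cons x xs ih => simp [List.flatMap_cons, ih]

lemma pvSum_pyRange (f : Int → Int) (a b : Nat) :
    ((PySem.List.pyRange (a : Int) (b : Int) 1).map f).sum = ∑ k ∈ Finset.Ico a b, f (k : Int) := by
  rw [PySem.List.pyRange_one]
  have h1 : ((b : Int) - (a : Int)).toNat = b - a := by omega
  rw [h1, Finset.sum_Ico_eq_sum_range, List.map_map]
  have : ∀ (g : Nat → Int) (m : Nat), ((List.range m).map g).sum = ∑ k ∈ Finset.range m, g k := by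
    intro g m; induction m with
    | zero => rfl
    | succ m ih => rw [List.range_succ, Finset.sum_range_succ, List.map_append, List.sum_append, ih]; simp
  rw [this]
  apply Finset.sum_congr rfl
  intro k _; simp

lemma pvCastSucc (k : Nat) : ((k : Int) + 1) = ((k + 1 : Nat) : Int) := by push_cast; ring

lemma pvInd_and (X Y C : Prop) [Decidable X] [Decidable Y] [Decidable C] (hC : C) :
    pvInd (X ∧ Y ∧ C) = pvInd X * pvInd Y := by
  by_cases hX : X <;> by_cases hY : Y <;> simp [pvInd, hX, hY, hC]

lemma pvSwap (n : Nat) (g : Nat → Nat → Int) (hg : ∀ a, g a a = 0) :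
    ∑ a ∈ Finset.range n, ∑ b ∈ Finset.Ico (a + 1) n, g a b
      = ∑ b ∈ Finset.range n, ∑ a ∈ Finset.range b, g a b := by
  have h1 : ∑ a ∈ Finset.range n, ∑ b ∈ Finset.Ico (a + 1) n, g a b
      = ∑ a ∈ Finset.Ico 0 n, ∑ b ∈ Finset.Ico a n, g a b := by
    rw [Finset.range_eq_Ico]
    apply Finset.sum_congr rfl
    intro a ha
    rw [Finset.mem_Ico] at ha
    rw [Finset.sum_eq_sum_Ico_succ_bot ha.2, hg, zero_add]
  rw [h1, Finset.sum_Ico_Ico_comm, Finset.range_eq_Ico]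
  apply Finset.sum_congr rfl
  intro b hb
  rw [Finset.mem_Ico] at hb
  rw [Finset.sum_Ico_succ_top (Nat.zero_le b), hg, add_zero]

-- ---- A-side lemmas ----
lemma pvKeys (A : List Int) :
    (PySem.Dict.ofList (PySem.List.enumerate A)).keys = PySem.List.pyRange 0 A.length 1 := by
  have h := PySem.Dict.items_foldl_insert_fresh (PySem.List.enumerate A) Prod.fst Prod.snd
    PySem.Dict.empty (by intro a _; simp [PySem.Dict.contains_empty]) (by
      rw [PySem.List.map_fst_enumerate]; exact PySem.List.nodup_pyRange_one 0 _)
  simp only [PySem.Dict.ofList, PySem.Dict.update]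
  unfold PySem.Dict.keys
  rw [show (fun (acc : PySem.Dict Int Int) (p : Int × Int) => acc.insert p.1 p.2)
      = (fun d a => d.insert (Prod.fst a) (Prod.snd a)) from rfl, h]
  simp [PySem.List.map_fst_enumerate]
  rfl

lemma pvPermSucc {α : Type} (xs : List α) (r : Nat) :
    PySem.List.permutations xs (r + 1)
      = (List.range xs.length).flatMap (fun i => match xs[i]? with
          | none => [] | some x => (PySem.List.permutations (xs.eraseIdx i) r).map (x :: ·)) := by
  rw [PySem.List.permutations]; rfl

lemma pvMemErase {α : Type} (xs : List α) (i : Nat) (h : i < xs.length) (z : α)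
    (hz : z ∈ xs) (hne : z ≠ xs[i]) : z ∈ xs.eraseIdx i := by
  rw [List.mem_eraseIdx_iff_getElem]
  obtain ⟨j, hj, hje⟩ := List.mem_iff_getElem.1 hz
  exact ⟨j, hj, by rintro rfl; exact hne hje.symm, hje⟩

lemma pvNodupPerms {α : Type} [DecidableEq α] (r : Nat) (xs : List α) (h : xs.Nodup) :
    (PySem.List.permutations xs r).Nodup := by
  induction r generalizing xs with
  | zero => simp [PySem.List.permutations_zero]
  | succ r ih =>
    rw [pvPermSucc, List.nodup_flatMap]
    constructor
    · intro i hi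
      rw [List.mem_range] at hi
      simp only [List.getElem?_eq_getElem hi]
      exact List.Nodup.map (fun a b hab => by simpa using hab) (ih _ (h.eraseIdx i))
    · rw [List.pairwise_iff_getElem]
      intro p q hp hq hpq
      simp only [List.length_range] at hp hq
      simp only [List.getElem_range]
      intro t htp htq
      simp only [List.getElem?_eq_getElem hp, List.getElem?_eq_getElem hq, List.mem_map] at htp htq
      obtain ⟨tp, _, rfl⟩ := htp
      obtain ⟨tq, _, h2⟩ := htq
      have : xs[q] = xs[p] := by injection h2
      exact absurd (h.getElem_inj_iff.1 this) (by omega)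

lemma pvMemPerms {α : Type} [DecidableEq α] (r : Nat) (xs : List α) (hxs : xs.Nodup) (t : List α) :
    t ∈ PySem.List.permutations xs r ↔ t.Nodup ∧ t.length = r ∧ ∀ y ∈ t, y ∈ xs := by
  constructor
  · intro ht
    obtain ⟨hlen, rest, hperm⟩ := PySem.List.exists_perm_of_mem_permutations r xs t ht
    have hnd : (t ++ rest).Nodup := hperm.symm.nodup hxs
    exact ⟨(List.nodup_append.1 hnd).1, hlen,
      fun y hy => hperm.mem_iff.1 (List.mem_append_left rest hy)⟩
  · rintro ⟨hnd, hlen, hsub⟩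
    induction r generalizing xs t with
    | zero =>
      rw [List.length_eq_zero_iff] at hlen
      subst hlen; simp [PySem.List.permutations_zero]
    | succ r ih =>
      match t, hlen with
      | y :: t', hlen =>
        obtain ⟨i, hi, hyi⟩ := List.mem_iff_getElem.1 (hsub y (by simp))
        rw [pvPermSucc, List.mem_flatMap]
        refine ⟨i, by simpa using hi, ?_⟩
        simp only [List.getElem?_eq_getElem hi, hyi, List.mem_map]
        refine ⟨t', ih _ (hxs.eraseIdx i) t' (List.nodup_cons.1 hnd).2 (by simpa using hlen) ?_, rfl⟩
        intro z hz
        refine pvMemErase xs i hi z (hsub z (by simp [hz])) ?_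
        rw [hyi]
        exact fun hzz => (List.nodup_cons.1 hnd).1 (hzz ▸ hz)

lemma pvFoldCount (A : List Int) (l : List (List Int)) (c : Int) (d : PySem.Dict (List Int) Int)
    (hn : l.Nodup) (hd : ∀ x ∈ l, d.contains x = false) :
    (l.foldl (fun (st : Int × PySem.Dict (List Int) Int) i =>
      if st.2.contains i = false then
        if PySem.List.pyGetD A (PySem.List.pyGetD i 0 0) 0 > PySem.List.pyGetD A (PySem.List.pyGetD i 1 0) 0
           ∧ PySem.List.pyGetD A (PySem.List.pyGetD i 2 0) 0 < PySem.List.pyGetD A (PySem.List.pyGetD i 3 0) 0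
           ∧ PySem.List.pyGetD i 0 0 < PySem.List.pyGetD i 1 0
           ∧ PySem.List.pyGetD i 1 0 < PySem.List.pyGetD i 2 0
           ∧ PySem.List.pyGetD i 2 0 < PySem.List.pyGetD i 3 0
        then (st.1 + 1, st.2.insert i 1) else (st.1, st.2.insert i 1)
      else st) (c, d)).1 = c + (l.countP (pvPb A) : Int) := by
  induction l generalizing c d with
  | nil => simp
  | cons x l ih =>
    have hx : d.contains x = false := hd x (by simp)
    rw [List.foldl_cons]
    have hd' : ∀ y ∈ l, (d.insert x 1).contains y = false := by
      intro y hy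
      rw [PySem.Dict.contains_insert]
      have hyx : y ≠ x := fun h => (List.nodup_cons.1 hn).1 (h ▸ hy)
      simp [hyx, hd y (List.mem_cons_of_mem x hy)]
    rw [List.countP_cons]
    by_cases hP : (PySem.List.pyGetD A (PySem.List.pyGetD x 0 0) 0 > PySem.List.pyGetD A (PySem.List.pyGetD x 1 0) 0
           ∧ PySem.List.pyGetD A (PySem.List.pyGetD x 2 0) 0 < PySem.List.pyGetD A (PySem.List.pyGetD x 3 0) 0
           ∧ PySem.List.pyGetD x 0 0 < PySem.List.pyGetD x 1 0
           ∧ PySem.List.pyGetD x 1 0 < PySem.List.pyGetD x 2 0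
           ∧ PySem.List.pyGetD x 2 0 < PySem.List.pyGetD x 3 0)
    · simp only [hx, if_true, if_pos hP]
      rw [ih (c + 1) _ (List.nodup_cons.1 hn).2 hd']
      have hb : pvPb A x = true := decide_eq_true hP
      simp [hb]
      ring
    · simp only [hx, if_true, if_neg hP]
      rw [ih c _ (List.nodup_cons.1 hn).2 hd']
      have hb : pvPb A x = false := decide_eq_false hP
      simp [hb]

lemma pvMemQ4 (n : Int) (t : List Int) :
    t ∈ pvQ4 n ↔ ∃ a b c d : Int, t = [a, b, c, d] ∧ 0 ≤ a ∧ a < b ∧ b < c ∧ c < d ∧ d < n := by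
  simp only [pvQ4, List.mem_flatMap, List.mem_map, PySem.List.mem_pyRange_one]
  constructor
  · rintro ⟨a, ⟨ha0, han⟩, b, ⟨hab, hbn⟩, c, ⟨hbc, hcn⟩, d, ⟨hcd, hdn⟩, rfl⟩
    exact ⟨a, b, c, d, rfl, ha0, by omega, by omega, by omega, hdn⟩
  · rintro ⟨a, b, c, d, rfl, h0, h1, h2, h3, h4⟩
    exact ⟨a, ⟨h0, by omega⟩, b, ⟨by omega, by omega⟩, c, ⟨by omega, by omega⟩, d, ⟨by omega, h4⟩, rfl⟩

lemma pvNodupQ4 (n : Int) : (pvQ4 n).Nodup := by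
  unfold pvQ4
  rw [List.nodup_flatMap]
  refine ⟨?_, ?_⟩
  · intro a _
    rw [List.nodup_flatMap]
    refine ⟨?_, ?_⟩
    · intro b _
      rw [List.nodup_flatMap]
      refine ⟨?_, ?_⟩
      · intro c _
        exact List.Nodup.map (fun x y hxy => by simpa using hxy) (PySem.List.nodup_pyRange_one _ _)
      · refine List.Pairwise.imp ?_ ((PySem.List.pairwise_lt_pyRange_one _ _))
        intro c c' hcc t ht ht'
        simp only [List.mem_map] at ht ht'
        obtain ⟨d, _, rfl⟩ := ht
        obtain ⟨d', _, h⟩ := ht'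
        simp at h
        omega
    · refine List.Pairwise.imp ?_ ((PySem.List.pairwise_lt_pyRange_one _ _))
      intro b b' hbb t ht ht'
      simp only [List.mem_flatMap, List.mem_map] at ht ht'
      obtain ⟨c, _, d, _, rfl⟩ := ht
      obtain ⟨c', _, d', _, h⟩ := ht'
      simp at h
      omega
  · refine List.Pairwise.imp ?_ ((PySem.List.pairwise_lt_pyRange_one _ _))
    intro a a' haa t ht ht'
    simp only [List.mem_flatMap, List.mem_map] at ht ht'
    obtain ⟨b, _, c, _, d, _, rfl⟩ := ht
    obtain ⟨b', _, c', _, d', _, h⟩ := ht'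
    simp at h
    omega

lemma pvPb_eq (A : List Int) (a b c d : Int) :
    pvPb A [a,b,c,d] = true ↔ (PySem.List.pyGetD A a 0 > PySem.List.pyGetD A b 0
      ∧ PySem.List.pyGetD A c 0 < PySem.List.pyGetD A d 0 ∧ a < b ∧ b < c ∧ c < d) := by
  have h0 : PySem.List.pyGetD [a,b,c,d] 0 0 = a := by rw [PySem.List.pyGetD_ofNat' [a,b,c,d] 0 0]; rfl
  have h1 : PySem.List.pyGetD [a,b,c,d] 1 0 = b := by rw [PySem.List.pyGetD_ofNat' [a,b,c,d] 1 0]; rfl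
  have h2 : PySem.List.pyGetD [a,b,c,d] 2 0 = c := by rw [PySem.List.pyGetD_ofNat' [a,b,c,d] 2 0]; rfl
  have h3 : PySem.List.pyGetD [a,b,c,d] 3 0 = d := by rw [PySem.List.pyGetD_ofNat' [a,b,c,d] 3 0]; rfl
  rw [pvPb, h0, h1, h2, h3, decide_eq_true_eq]

lemma pvCountEq (A : List Int) :
    (PySem.List.permutations (PySem.List.pyRange 0 A.length 1) 4).countP (pvPb A)
      = (pvQ4 A.length).countP (pvPb A) := by
  rw [List.countP_eq_length_filter, List.countP_eq_length_filter]
  apply List.Perm.length_eq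
  rw [List.perm_ext_iff_of_nodup
      ((pvNodupPerms 4 _ (PySem.List.nodup_pyRange_one 0 _)).filter _)
      ((pvNodupQ4 _).filter _)]
  intro t
  simp only [List.mem_filter]
  constructor
  · rintro ⟨htp, hpb⟩
    refine ⟨?_, hpb⟩
    obtain ⟨hnd, hlen, hsub⟩ := (pvMemPerms 4 _ (PySem.List.nodup_pyRange_one 0 _) t).1 htp
    match t, hlen with
    | [a, b, c, d], _ =>
      have ha := PySem.List.mem_pyRange_one.1 (hsub a (by simp))
      have hd := PySem.List.mem_pyRange_one.1 (hsub d (by simp))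
      have hch := (pvPb_eq A a b c d).1 hpb
      exact (pvMemQ4 _ _).2 ⟨a, b, c, d, rfl, ha.1, hch.2.2.1, hch.2.2.2.1, hch.2.2.2.2, hd.2⟩
  · rintro ⟨htq, hpb⟩
    refine ⟨?_, hpb⟩
    obtain ⟨a, b, c, d, rfl, h0, h1, h2, h3, h4⟩ := (pvMemQ4 _ _).1 htq
    refine (pvMemPerms 4 _ (PySem.List.nodup_pyRange_one 0 _) _).2 ⟨?_, rfl, ?_⟩
    · simp; omega
    · intro y hy
      rw [PySem.List.mem_pyRange_one]
      simp only [List.mem_cons, List.not_mem_nil] at hy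
      rcases hy with rfl | rfl | rfl | rfl | h <;> first | omega | exact absurd h (by simp)

lemma pvF_eq (A : List Int) (a b c d : Nat) (h1 : a < b) (h2 : b < c) (h3 : c < d) :
    (if pvPb A [(a:Int),(b:Int),(c:Int),(d:Int)] = true then (1:Int) else 0)
      = pvInd (A.getD a 0 > A.getD b 0) * pvInd (A.getD c 0 < A.getD d 0) := by
  rw [← pvInd_and _ _ ((a:Int) < b ∧ (b:Int) < c ∧ (c:Int) < d) (by omega)]
  unfold pvInd
  refine if_congr ?_ rfl rfl
  rw [pvPb_eq]
  simp [pysem]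

lemma pvQ4Count (A : List Int) : ((pvQ4 (A.length : Int)).countP (pvPb A) : Int) = pvM A := by
  rw [← PySem.List.sum_map_ite_one_zero (pvPb A) (pvQ4 (A.length : Int))]
  unfold pvQ4
  rw [pvSum_flatMap]
  rw [show ((PySem.List.pyRange 0 (A.length : Int) 1).map (fun a =>
        (((PySem.List.pyRange (a + 1) (A.length : Int) 1).flatMap (fun b =>
          (PySem.List.pyRange (b + 1) (A.length : Int) 1).flatMap (fun c =>
            (PySem.List.pyRange (c + 1) (A.length : Int) 1).map (fun d => [a, b, c, d])))).map
              (fun t => if pvPb A t = true then (1:Int) else 0)).sum)).sum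
      = ∑ k ∈ Finset.Ico 0 A.length, (((PySem.List.pyRange ((k:Int) + 1) (A.length : Int) 1).flatMap (fun b =>
          (PySem.List.pyRange (b + 1) (A.length : Int) 1).flatMap (fun c =>
            (PySem.List.pyRange (c + 1) (A.length : Int) 1).map (fun d => [(k:Int), b, c, d])))).map
              (fun t => if pvPb A t = true then (1:Int) else 0)).sum
      from by rw [show (0 : Int) = ((0 : Nat) : Int) from rfl, pvSum_pyRange]]
  have hstep : ∀ a ∈ Finset.Ico 0 A.length,
      (((PySem.List.pyRange ((a:Int) + 1) (A.length : Int) 1).flatMap (fun b =>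
        (PySem.List.pyRange (b + 1) (A.length : Int) 1).flatMap (fun c =>
          (PySem.List.pyRange (c + 1) (A.length : Int) 1).map (fun d => [(a:Int), b, c, d])))).map
            (fun t => if pvPb A t = true then (1:Int) else 0)).sum
      = ∑ b ∈ Finset.Ico (a + 1) A.length, pvInd (A.getD a 0 > A.getD b 0) * pvT A b := by
    intro a _
    rw [pvSum_flatMap, pvCastSucc, pvSum_pyRange]
    apply Finset.sum_congr rfl
    intro b hb
    beta_reduce
    rw [pvSum_flatMap, pvCastSucc, pvSum_pyRange]
    rw [pvT, Finset.mul_sum]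
    apply Finset.sum_congr rfl
    intro c hc
    beta_reduce
    rw [List.map_map, pvCastSucc, pvSum_pyRange]
    rw [pvAsc, Finset.mul_sum]
    apply Finset.sum_congr rfl
    intro d hd
    simp only [Function.comp_apply]
    rw [Finset.mem_Ico] at hb hc hd
    exact pvF_eq A a b c d (by omega) (by omega) (by omega)
  rw [Finset.sum_congr rfl hstep]
  rw [← Finset.range_eq_Ico]
  rw [pvSwap _ _ (by intro a; simp [pvInd])]
  rw [pvM]
  apply Finset.sum_congr rfl
  intro b _
  rw [pvInv, Finset.sum_mul]

-- ---- B-side loop ----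
lemma pvBLoop (A : List Int) (m : Nat) (t s : Int) :
    ((PySem.List.pyRange ((m : Int) - 1) (-1) (-1)).foldl (fun (st : Int × Int) j =>
      (st.1 + ((PySem.List.pyRange 0 j 1).map
        (fun i => if PySem.List.pyGetD A i 0 > PySem.List.pyGetD A j 0 then (1 : Int) else 0)).sum * st.2,
       st.2 + ((PySem.List.pyRange (j + 1) (A.length : Int) 1).map
        (fun l => if PySem.List.pyGetD A j 0 < PySem.List.pyGetD A l 0 then (1 : Int) else 0)).sum)) (t, s))
    = (t + ∑ j ∈ Finset.range m, pvInv A j * (s + ∑ k ∈ Finset.Ico (j + 1) m, pvAsc A k),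
       s + ∑ j ∈ Finset.range m, pvAsc A j) := by
  induction m generalizing t s with
  | zero =>
    rw [show ((0:Nat):Int) - 1 = -1 by norm_num, PySem.List.pyRange_neg_one_eq_nil le_rfl]
    simp
  | succ m ih =>
    rw [show ((m+1:Nat):Int) - 1 = (m:Int) by push_cast; ring,
        PySem.List.pyRange_neg_one_cons (by omega)]
    rw [List.foldl_cons]
    have hinv : ((PySem.List.pyRange 0 ((m:Nat):Int) 1).map
        (fun i => if PySem.List.pyGetD A i 0 > PySem.List.pyGetD A ((m:Nat):Int) 0 then (1 : Int) else 0)).sum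
        = pvInv A m := by
      rw [show (0:Int) = ((0:Nat):Int) from rfl, pvSum_pyRange, pvInv, ← Finset.range_eq_Ico]
      apply Finset.sum_congr rfl
      intro k _
      simp [pvInd, pysem]
    have hasc : ((PySem.List.pyRange (((m:Nat):Int) + 1) (A.length : Int) 1).map
        (fun l => if PySem.List.pyGetD A ((m:Nat):Int) 0 < PySem.List.pyGetD A l 0 then (1 : Int) else 0)).sum
        = pvAsc A m := by
      rw [pvCastSucc, pvSum_pyRange, pvAsc]
      apply Finset.sum_congr rfl
      intro k _
      simp [pvInd, pysem]
    rw [hinv, hasc]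
    rw [ih]
    simp only [Prod.mk.injEq]
    refine ⟨?_, ?_⟩
    · have hsum : ∀ j ∈ Finset.range m,
          pvInv A j * (s + pvAsc A m + ∑ k ∈ Finset.Ico (j + 1) m, pvAsc A k)
            = pvInv A j * (s + ∑ k ∈ Finset.Ico (j + 1) (m + 1), pvAsc A k) := by
        intro j hj
        rw [Finset.mem_range] at hj
        rw [Finset.sum_Ico_succ_top (by omega)]
        ring
      rw [Finset.sum_congr rfl hsum, Finset.sum_range_succ, Finset.Ico_self, Finset.sum_empty,
          add_zero]
      ring
    · rw [Finset.sum_range_succ]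
      ring

lemma pvSolveA (N : Int) (A : List Int) : solve N A = PySem.Int.mod (pvM A) (10 ^ 9 + 7) := by
  unfold solve
  simp only [pvKeys]
  rw [pvFoldCount A _ 0 PySem.Dict.empty
      (pvNodupPerms 4 _ (PySem.List.nodup_pyRange_one 0 _))
      (by intro x _; simp [PySem.Dict.contains_empty])]
  rw [pvCountEq, pvQ4Count, zero_add]

lemma pvSolveB (N : Int) (A : List Int) : solve_alt N A = PySem.Int.mod (pvM A) (10 ^ 9 + 7) := by
  show PySem.Int.mod ((PySem.List.pyRange ((A.length : Int) - 1) (-1) (-1)).foldl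
      (fun (st : Int × Int) j =>
        (st.1 + ((PySem.List.pyRange 0 j 1).map
          (fun i => if PySem.List.pyGetD A i 0 > PySem.List.pyGetD A j 0 then (1 : Int) else 0)).sum * st.2,
         st.2 + ((PySem.List.pyRange (j + 1) (A.length : Int) 1).map
          (fun l => if PySem.List.pyGetD A j 0 < PySem.List.pyGetD A l 0 then (1 : Int) else 0)).sum))
      (0, 0)).1 (10 ^ 9 + 7) = PySem.Int.mod (pvM A) (10 ^ 9 + 7)
  rw [pvBLoop A A.length 0 0]
  simp only [zero_add]
  rw [pvM]
  congr 1

-- ===== VERDICT (by name: the statement is the Claim_ definition above) =====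
theorem solve_spec : Claim_equal_solve := by
  intro N A _
  unfold Spec_solve
  rw [pvSolveA, pvSolveB]
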